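-- pv_equiv track=rewrite | github.com/shivapk/Programming-Leetcode | Python/Trees/checkallinternalnodesBSThaveonechild.py | check
-- ===== SOURCE A (Python) =====
-- def check(arr):
--     max=min=arr[-1]
--     for i in range(len(arr)-2,-1,-1):
--         if arr[i]>max:
--             max=arr[i]
--         elif arr[i]<min:
--             min=arr[i]
--         else:
--             return False
--
--     return True
-- ===== SOURCE B (Python) =====
-- def check(arr):
--     n = len(arr)
--     suf_max = [0] * n
--     suf_min = [0] * n
--     suf_max[n - 1] = suf_min[n - 1] = arr[n - 1]
--     for i in range(n - 2, -1, -1):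
--         suf_max[i] = arr[i] if arr[i] > suf_max[i + 1] else suf_max[i + 1]
--         suf_min[i] = arr[i] if arr[i] < suf_min[i + 1] else suf_min[i + 1]
--     for i in range(n - 1):
--         if not (arr[i] > suf_max[i + 1] or arr[i] < suf_min[i + 1]):
--             return False
--     return True
-- ===== Notes on version B (the rewrite author's own statement) =====
-- stated objective: alternative
-- what changed: A fuses everything into one backward scan with two scalar extremes and an early return; B first materializes suffix-max/suffix-min tables in a backward pass and then runs a separate forward pass that checks each element against the tables.
-- outside the precondition, e.g. on check([]): A raises IndexError, B raises IndexError
import Mathlib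
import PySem

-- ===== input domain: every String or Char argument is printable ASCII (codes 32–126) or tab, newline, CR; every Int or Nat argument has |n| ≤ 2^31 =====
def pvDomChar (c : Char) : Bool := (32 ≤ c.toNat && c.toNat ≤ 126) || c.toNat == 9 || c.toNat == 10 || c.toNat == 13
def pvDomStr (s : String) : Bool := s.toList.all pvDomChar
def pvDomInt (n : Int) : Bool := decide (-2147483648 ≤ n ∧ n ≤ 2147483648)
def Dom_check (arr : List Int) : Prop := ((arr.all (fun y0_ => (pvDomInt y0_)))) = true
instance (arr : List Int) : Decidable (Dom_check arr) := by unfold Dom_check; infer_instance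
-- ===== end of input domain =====

-- B replaces A's single fused backward scan (two scalar extremes, early return) by a
-- backward pass building suffix-max/min tables plus a separate forward checking pass
-- (objective: alternative decomposition, same O(n) cost).

-- ===== PORT A =====
-- the for-loop over range(len(arr)-2,-1,-1) with early 'return False'
def checkGo (arr : List Int) : List Int → Int → Int → Bool
  | [], _, _ => true
  | i :: rest, mx, mn =>
    let x := PySem.List.pyGetD arr i 0   -- arr[i]; i is always in range inside the loop
    if x > mx then checkGo arr rest x mn
    else if x < mn then checkGo arr rest mx x
    else false

def check (arr : List Int) : Bool :=
  match PySem.List.pyGet? arr (-1) with   -- max=min=arr[-1] (IndexError on [] is outside Pre_)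
  | none => false
  | some z => checkGo arr (PySem.List.pyRange ((arr.length : Int) - 2) (-1) (-1)) z z

-- ===== PORT B =====
-- backward pass: list of (suf_max[i], suf_min[i]) pairs, built from the right
-- ('x if x > m else m' on ints is exactly 'max x m', likewise for min)
def sufTab : List Int → List (Int × Int)
  | [] => []
  | [x] => [(x, x)]
  | x :: y :: r =>
    match sufTab (y :: r) with
    | [] => [(x, x)]          -- unreachable: sufTab of a nonempty list is nonempty
    | p :: t => (max x p.1, min x p.2) :: p :: t

-- forward pass: arr[i] compared with the tables at i+1
def fwd : List Int → List (Int × Int) → Bool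
  | x :: xs, _ :: p :: ts =>
    (decide (x > p.1) || decide (x < p.2)) && fwd xs (p :: ts)
  | _, _ => true

def check_alt (arr : List Int) : Bool := fwd arr (sufTab arr)

-- ===== PRECONDITION & SPEC =====
-- A raises IndexError on [] (arr[-1]); B raises there too, so [] is excluded.
def Pre_check (arr : List Int) : Prop := arr ≠ []
instance (arr : List Int) : Decidable (Pre_check arr) := by unfold Pre_check; infer_instance
def pvWitness_check : List Int := [5, 1, 3]

def Spec_check (arr : List Int) (out : Bool) : Prop := out = check_alt arr
instance (arr : List Int) (out : Bool) : Decidable (Spec_check arr out) := by unfold Spec_check; infer_instance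

-- ===== CLAIM (what is proved, stated in full; the proofs are below) =====
def Claim_equal_check : Prop := ∀ (arr : List Int), Dom_check arr → Pre_check arr → Spec_check arr (check arr)

-- ===== LEMMAS AND PROOFS =====

-- A's loop as a loop over the VALUES it reads (arr in reverse order, last element excluded)
def loopR : List Int → Int → Int → Bool
  | [], _, _ => true
  | y :: ys, mx, mn =>
    if y > mx then loopR ys y mn
    else if y < mn then loopR ys mx y
    else false

-- B's passes as one recursive check: good (x :: y :: r) tests x against max/min of y :: r
def good : List Int → Bool
  | x :: y :: r => (decide (x > r.foldr max y) || decide (x < r.foldr min y)) && good (y :: r)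
  | _ => true

theorem foldr_max_left (l : List Int) (a b : Int) :
    l.foldr max (max a b) = max a (l.foldr max b) := by
  induction l with
  | nil => rfl
  | cons c l ih => simp [List.foldr, ih, max_left_comm]

theorem foldr_min_left (l : List Int) (a b : Int) :
    l.foldr min (min a b) = min a (l.foldr min b) := by
  induction l with
  | nil => rfl
  | cons c l ih => simp [List.foldr, ih, min_left_comm]

theorem foldr_max_swap (l : List Int) (a b : Int) :
    max a (l.foldr max b) = max b (l.foldr max a) := by
  rw [← foldr_max_left, max_comm, foldr_max_left]

theorem foldr_min_swap (l : List Int) (a b : Int) :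
    min a (l.foldr min b) = min b (l.foldr min a) := by
  rw [← foldr_min_left, min_comm, foldr_min_left]

theorem le_foldr_max (l : List Int) (a : Int) : a ≤ l.foldr max a := by
  induction l with
  | nil => simp
  | cons c l ih => simpa using Or.inr ih

theorem foldr_min_le (l : List Int) (a : Int) : l.foldr min a ≤ a := by
  induction l with
  | nil => simp
  | cons c l ih => simpa using Or.inr ih

theorem loopR_snoc (l : List Int) (x mx mn : Int) (h : mn ≤ mx) :
    loopR (l ++ [x]) mx mn
      = (loopR l mx mn && (decide (x > l.foldr max mx) || decide (x < l.foldr min mn))) := by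
  induction l generalizing mx mn with
  | nil =>
    simp only [List.nil_append, loopR, List.foldr]
    split_ifs <;> simp_all
  | cons y l ih =>
    simp only [List.cons_append, loopR, List.foldr]
    split_ifs with h1 h2
    · rw [ih y mn (le_of_lt (lt_of_le_of_lt h h1))]
      have hmax : max y (l.foldr max mx) = l.foldr max y := by
        rw [← foldr_max_left, max_eq_left (le_of_lt h1)]
      have hmin : min y (l.foldr min mn) = l.foldr min mn := by
        have : l.foldr min mn ≤ y :=
          le_of_lt (lt_of_le_of_lt (le_trans (foldr_min_le l mn) h) h1)
        omega
      simp only [hmax, hmin]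
    · rw [ih mx y (le_of_lt (lt_of_lt_of_le h2 h))]
      have hmax : max y (l.foldr max mx) = l.foldr max mx := by
        have : y ≤ l.foldr max mx :=
          le_of_lt (lt_of_lt_of_le (lt_of_lt_of_le h2 h) (le_foldr_max l mx))
        omega
      have hmin : min y (l.foldr min mn) = l.foldr min y := by
        rw [← foldr_min_left, min_eq_left (le_of_lt h2)]
      simp only [hmax, hmin]
    · simp

theorem foldl_max_eq_foldr (l : List Int) (a : Int) :
    l.foldl max a = l.foldr max a := by
  induction l generalizing a with
  | nil => rfl
  | cons x l ih =>
    simp only [List.foldl, List.foldr, ih, ← foldr_max_left, max_comm a x]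

theorem foldl_min_eq_foldr (l : List Int) (a : Int) :
    l.foldl min a = l.foldr min a := by
  induction l generalizing a with
  | nil => rfl
  | cons x l ih =>
    simp only [List.foldl, List.foldr, ih, ← foldr_min_left, min_comm a x]

theorem rev_foldr_max (l : List Int) (z : Int) :
    l.reverse.foldr max z = l.foldr max z := by
  rw [List.foldr_reverse]
  have : (fun (x y : Int) => max y x) = max := by
    funext x y; exact max_comm y x
  rw [this, foldl_max_eq_foldr]

theorem rev_foldr_min (l : List Int) (z : Int) :
    l.reverse.foldr min z = l.foldr min z := by
  rw [List.foldr_reverse]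
  have : (fun (x y : Int) => min y x) = min := by
    funext x y; exact min_comm y x
  rw [this, foldl_min_eq_foldr]

-- A's reversed-value loop equals B's forward recursion
theorem loopR_eq_good (l : List Int) (z : Int) :
    loopR l.reverse z z = good (l ++ [z]) := by
  induction l with
  | nil => rfl
  | cons x l ih =>
    have h := loopR_snoc l.reverse x z z le_rfl
    rw [List.reverse_cons, h, ih, rev_foldr_max, rev_foldr_min, Bool.and_comm]
    cases l with
    | nil => simp [good]
    | cons y r =>
      simp only [List.cons_append, good, List.foldr_append, List.foldr]
      have e1 : r.foldr max (max z y) = max y (r.foldr max z) :=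
        (foldr_max_left r z y).trans (foldr_max_swap r z y)
      have e2 : r.foldr min (min z y) = min y (r.foldr min z) :=
        (foldr_min_left r z y).trans (foldr_min_swap r z y)
      rw [e1, e2]
      rfl

-- the suffix tables hold exactly the suffix extremes
theorem sufTab_spec (x : Int) (xs : List Int) :
    sufTab (x :: xs) = (xs.foldr max x, xs.foldr min x) :: sufTab xs := by
  induction xs generalizing x with
  | nil => rfl
  | cons y r ih =>
    show (match sufTab (y :: r) with
      | [] => [(x, x)]
      | p :: t => (max x p.1, min x p.2) :: p :: t) = _
    rw [ih y]
    simp only [List.foldr]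
    rw [foldr_max_swap r x y, foldr_min_swap r x y]

theorem fwd_sufTab_eq_good (arr : List Int) : fwd arr (sufTab arr) = good arr := by
  induction arr with
  | nil => rfl
  | cons x xs ih =>
    cases xs with
    | nil => rfl
    | cons y r =>
      rw [sufTab_spec x (y :: r), sufTab_spec y r]
      show ((decide (x > r.foldr max y) || decide (x < r.foldr min y))
          && fwd (y :: r) ((r.foldr max y, r.foldr min y) :: sufTab r)) = good (x :: y :: r)
      rw [← sufTab_spec y r, ih]
      rfl

-- index loop of A = value loop over the reversed prefix
theorem checkGo_bridge (arr : List Int) : ∀ (i : Nat), i < arr.length → ∀ mx mn,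
    checkGo arr (PySem.List.pyRange (i : Int) (-1) (-1)) mx mn
      = loopR (arr.take (i + 1)).reverse mx mn := by
  intro i
  induction i with
  | zero =>
    intro hi mx mn
    rw [PySem.List.pyRange_neg_one_cons (by norm_num),
        show ((0 : Nat) : Int) - 1 = -1 by norm_num,
        PySem.List.pyRange_neg_one_eq_nil le_rfl]
    have hget : PySem.List.pyGetD arr ((0 : Nat) : Int) 0 = arr[0]'hi := by
      rw [PySem.List.pyGetD_natCast, List.getD_eq_getElem _ _ hi]
    have htake : (arr.take (0 + 1)).reverse = arr[0]'hi :: (arr.take 0).reverse := by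
      rw [List.take_add_one, List.getElem?_eq_getElem hi]; simp
    rw [htake]
    simp only [checkGo, loopR, hget, List.take_zero, List.reverse_nil]
  | succ i ih =>
    intro hi mx mn
    have hii : i < arr.length := Nat.lt_of_succ_lt hi
    rw [PySem.List.pyRange_neg_one_cons (by push_cast; omega),
        show ((i + 1 : Nat) : Int) - 1 = ((i : Nat) : Int) by push_cast; omega]
    have hget : PySem.List.pyGetD arr ((i + 1 : Nat) : Int) 0 = arr[i + 1]'hi := by
      rw [PySem.List.pyGetD_natCast, List.getD_eq_getElem _ _ hi]
    have htake : (arr.take (i + 1 + 1)).reverse = arr[i + 1]'hi :: (arr.take (i + 1)).reverse := by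
      rw [List.take_add_one, List.getElem?_eq_getElem hi]; simp
    rw [htake]
    simp only [checkGo, loopR, hget]
    split_ifs <;> first | exact ih hii _ _ | rfl

theorem pvGetLast (arr : List Int) (h : arr ≠ []) :
    PySem.List.pyGet? arr (-1) = some (arr.getLast h) := by
  rw [PySem.List.pyGet?_neg_one, List.getLast?_eq_some_getLast h]

theorem check_eq_loopR (arr : List Int) (h : arr ≠ []) :
    check arr = loopR arr.dropLast.reverse (arr.getLast h) (arr.getLast h) := by
  have hlen : 0 < arr.length := List.length_pos_iff.mpr h
  have hc : check arr = checkGo arr (PySem.List.pyRange ((arr.length : Int) - 2) (-1) (-1))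
      (arr.getLast h) (arr.getLast h) := by
    unfold check; rw [pvGetLast arr h]
  rw [hc]
  by_cases h1 : arr.length = 1
  · rw [PySem.List.pyRange_neg_one_eq_nil (by omega)]
    have hd : arr.dropLast = [] := by
      cases arr with
      | nil => simp at hlen
      | cons a l =>
        have : l = [] := by simpa using h1
        simp [this]
    rw [hd]; rfl
  · have h2 : 2 ≤ arr.length := by omega
    rw [show ((arr.length : Int) - 2) = ((arr.length - 2 : Nat) : Int) by omega,
        checkGo_bridge arr (arr.length - 2) (by omega),
        show arr.length - 2 + 1 = arr.length - 1 by omega,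
        List.dropLast_eq_take]

-- ===== VERDICT (by name: the statement is the Claim_ definition above) =====
theorem check_spec : Claim_equal_check := by
  intro arr _ hpre
  unfold Spec_check
  rw [check_eq_loopR arr hpre, loopR_eq_good, List.dropLast_append_getLast hpre]
  unfold check_alt
  rw [fwd_sufTab_eq_good]
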